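-- pv_equiv track=rewrite | github.com/andymclaughlin/personal_finance | src/main/python/com/abm/pers_finance/HashUtility.py | computeAllIdf
-- ===== SOURCE A (Python) =====
-- def computeAllIdf(stringList):
--     IdfDict = dict()
--     for string in stringList:
--         if string is not None:
--             for token in string.split():
--                 if token not in IdfDict.keys():
--                     IdfDict[token] = 1
--                 else:
--                     IdfDict[token] = IdfDict[token] + 1
--     return IdfDict
-- ===== SOURCE B (Python) =====
-- def computeAllIdf(stringList):
--     tokens = [t for s in stringList if s is not None for t in s.split()]
--     return _mergeCounts(tokens)
--
--
-- def _mergeCounts(tokens):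
--     # divide and conquer: count each half recursively, then add the two dicts
--     if len(tokens) <= 1:
--         return {t: 1 for t in tokens}
--     mid = len(tokens) // 2
--     counts = _mergeCounts(tokens[:mid])
--     for token, n in _mergeCounts(tokens[mid:]).items():
--         counts[token] = counts.get(token, 0) + n
--     return counts
-- ===== Notes on version B (the rewrite author's own statement) =====
-- stated objective: alternative
-- what changed: Flattens all tokens of the non-None strings into one list and counts them by divide-and-conquer: recursively count each half and merge the two count dicts by adding values (new keys append), instead of A's single pass that tests membership and increments per token.
import Mathlib
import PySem

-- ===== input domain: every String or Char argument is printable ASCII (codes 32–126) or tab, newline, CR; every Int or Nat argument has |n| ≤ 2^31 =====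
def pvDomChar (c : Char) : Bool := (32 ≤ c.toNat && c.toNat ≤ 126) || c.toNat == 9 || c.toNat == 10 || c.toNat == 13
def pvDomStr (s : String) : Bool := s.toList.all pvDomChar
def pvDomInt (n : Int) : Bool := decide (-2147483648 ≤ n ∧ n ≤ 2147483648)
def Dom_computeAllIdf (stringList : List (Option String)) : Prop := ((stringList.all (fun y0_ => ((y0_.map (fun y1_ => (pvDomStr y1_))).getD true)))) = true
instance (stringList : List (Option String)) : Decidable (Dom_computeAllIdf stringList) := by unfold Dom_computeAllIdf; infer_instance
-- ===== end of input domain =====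

-- B flattens all tokens and counts them by divide-and-conquer (count each half, add the two dicts);
-- A makes one pass with a per-token membership test and increment.  Objective: alternative (same result, incl. key order).

-- ===== PORT A =====
def computeAllIdf (stringList : List (Option String)) : List (String × Int) :=
  (stringList.foldl (fun d os =>
      match os with
      | none => d
      | some s =>
        (PySem.Str.split₀ s).foldl (fun d t =>
          if d.contains t = false then d.insert t 1
          else d.insert t (d.getD t 0 + 1)) d)
    PySem.Dict.empty).items

-- ===== PORT B =====
-- the comprehension flattening the tokens of the non-None strings
def pvTokens (stringList : List (Option String)) : List String :=
  stringList.foldl (fun acc os =>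
      match os with
      | none => acc
      | some s => acc ++ PySem.Str.split₀ s) []

-- `_mergeCounts` from Source B; tokens[:mid] / tokens[mid:] are take/drop (nonnegative in-range slice)
def pvMergeCounts (tokens : List String) : PySem.Dict String Int :=
  if tokens.length ≤ 1 then
    tokens.foldl (fun d t => d.insert t 1) PySem.Dict.empty
  else
    let mid := tokens.length / 2
    let counts := pvMergeCounts (tokens.take mid)
    ((pvMergeCounts (tokens.drop mid)).items).foldl
      (fun d p => d.insert p.1 (d.getD p.1 0 + p.2)) counts
termination_by tokens.length
decreasing_by
  · simp only [List.length_take]; omega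
  · simp only [List.length_drop]; omega

def computeAllIdf_alt (stringList : List (Option String)) : List (String × Int) :=
  (pvMergeCounts (pvTokens stringList)).items

-- ===== PRECONDITION & SPEC =====
def Spec_computeAllIdf (stringList : List (Option String)) (out : List (String × Int)) : Prop := out = computeAllIdf_alt stringList
instance (stringList : List (Option String)) (out : List (String × Int)) : Decidable (Spec_computeAllIdf stringList out) := by unfold Spec_computeAllIdf; infer_instance

-- ===== CLAIM =====
def Claim_equal_computeAllIdf : Prop := ∀ (stringList : List (Option String)), Dom_computeAllIdf stringList → Spec_computeAllIdf stringList (computeAllIdf stringList)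

-- ===== LEMMAS AND PROOFS =====

-- A's per-token step is exactly "insert t (getD t 0 + 1)".
theorem stepA_eq (d : PySem.Dict String Int) (t : String) :
    (if d.contains t = false then d.insert t 1 else d.insert t (d.getD t 0 + 1))
      = d.insert t (d.getD t 0 + 1) := by
  by_cases h : d.contains t = false
  · simp [h, PySem.Dict.getD_of_not_contains d 0 h]
  · simp [h]

-- A's nested loop equals a single increment fold over the flattened token list.
theorem flattenA (sl : List (Option String)) :
    ∀ (d : PySem.Dict String Int),
    sl.foldl (fun d os =>
      match os with
      | none => d
      | some s =>
        (PySem.Str.split₀ s).foldl (fun d t =>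
          if d.contains t = false then d.insert t 1
          else d.insert t (d.getD t 0 + 1)) d) d
      = (pvTokens sl).foldl (fun d t => d.insert t (d.getD t 0 + 1)) d := by
  have key : ∀ (l : List String) (d : PySem.Dict String Int),
      l.foldl (fun d t => if d.contains t = false then d.insert t 1
                          else d.insert t (d.getD t 0 + 1)) d
        = l.foldl (fun d t => d.insert t (d.getD t 0 + 1)) d := by
    intro l d
    simp only [stepA_eq]
  have acc_shift : ∀ (sl : List (Option String)) (acc : List String),
      sl.foldl (fun acc os => match os with | none => acc | some s => acc ++ PySem.Str.split₀ s) acc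
        = acc ++ pvTokens sl := by
    intro sl
    induction sl with
    | nil => intro acc; simp [pvTokens]
    | cons os sl ih =>
      intro acc
      cases os with
      | none =>
        simpa [pvTokens] using ih acc
      | some s =>
        simp only [pvTokens, List.foldl_cons, List.nil_append]
        rw [ih (acc ++ PySem.Str.split₀ s), ih (PySem.Str.split₀ s)]
        simp
  induction sl with
  | nil => intro d; rfl
  | cons os sl ih =>
    intro d
    cases os with
    | none => simpa [pvTokens] using ih d
    | some s =>
      simp only [pvTokens, List.foldl_cons, List.nil_append]
      rw [ih _, acc_shift sl (PySem.Str.split₀ s), List.foldl_append, key]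

-- inserting at a key already present commutes (as dicts, items order included) with inserting at another key
theorem insert_comm_of_contains (d : PySem.Dict String Int) (t k : String) (w u : Int)
    (hk : k ≠ t) (ht : d.contains t = true) :
    (d.insert t w).insert k u = (d.insert k u).insert t w := by
  apply PySem.Dict.ext
  by_cases hc : d.contains k = true
  · have h1 : (d.insert t w).contains k = true := by
      rw [PySem.Dict.contains_insert]; simp [hc]
    have h2 : (d.insert k u).contains t = true := by
      rw [PySem.Dict.contains_insert]; simp [ht]
    rw [PySem.Dict.items_insert_of_contains _ u h1,
        PySem.Dict.items_insert_of_contains _ w h2,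
        PySem.Dict.items_insert_of_contains _ w ht,
        PySem.Dict.items_insert_of_contains _ u hc]
    simp only [List.map_map]
    refine List.map_congr_left ?_
    intro p _
    by_cases hpt : p.1 = t
    · simp [Function.comp, hpt, Ne.symm hk]
    · by_cases hpk : p.1 = k
      · simp [Function.comp, hpk, hk]
      · simp [Function.comp, hpt, hpk]
  · have hc' : d.contains k = false := by simpa using hc
    have h1 : (d.insert t w).contains k = false := by
      rw [PySem.Dict.contains_insert]; simp [hc', hk]
    have h2 : (d.insert k u).contains t = true := by
      rw [PySem.Dict.contains_insert]; simp [ht]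
    rw [PySem.Dict.items_insert_of_not_contains _ u h1,
        PySem.Dict.items_insert_of_contains _ w ht,
        PySem.Dict.items_insert_of_contains _ w h2,
        PySem.Dict.items_insert_of_not_contains _ u hc']
    rw [List.map_append]
    simp [hk]

-- overwriting a present key commutes with the merge fold when no merged key equals it
theorem fold_insert_comm (L : List (String × Int)) (t : String) :
    ∀ (d : PySem.Dict String Int) (w : Int),
    (∀ p ∈ L, p.1 ≠ t) → d.contains t = true →
    L.foldl (fun d p => d.insert p.1 (d.getD p.1 0 + p.2)) (d.insert t w)
      = (L.foldl (fun d p => d.insert p.1 (d.getD p.1 0 + p.2)) d).insert t w := by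
  induction L with
  | nil => intro d w _ _; rfl
  | cons p L ih =>
    intro d w hne ht
    have hpt : p.1 ≠ t := hne p (by simp)
    simp only [List.foldl_cons]
    rw [PySem.Dict.getD_insert_of_ne _ _ _ hpt,
        insert_comm_of_contains d t p.1 w _ hpt ht]
    exact ih _ w (fun q hq => hne q (by simp [hq]))
      (by rw [PySem.Dict.contains_insert]; simp [ht])

-- getD at t is unchanged by the merge fold when no merged key equals t
theorem fold_getD_of_ne (L : List (String × Int)) (t : String) :
    ∀ (d : PySem.Dict String Int),
    (∀ p ∈ L, p.1 ≠ t) →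
    (L.foldl (fun d p => d.insert p.1 (d.getD p.1 0 + p.2)) d).getD t 0 = d.getD t 0 := by
  induction L with
  | nil => intro d _; rfl
  | cons p L ih =>
    intro d hne
    simp only [List.foldl_cons]
    rw [ih _ (fun q hq => hne q (by simp [hq])),
        PySem.Dict.getD_insert_of_ne _ _ _ (Ne.symm (hne p (by simp)))]

-- bumping the value of key t in the merged item list = merging, then one increment at t
theorem bump_lemma (L : List (String × Int)) (t : String) (c : Int) :
    ∀ (d : PySem.Dict String Int),
    (L.map Prod.fst).Nodup → (t, c) ∈ L →
    (L.map (fun p => if p.1 == t then (t, c + 1) else p)).foldl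
        (fun d p => d.insert p.1 (d.getD p.1 0 + p.2)) d
      = (L.foldl (fun d p => d.insert p.1 (d.getD p.1 0 + p.2)) d).insert t
          ((L.foldl (fun d p => d.insert p.1 (d.getD p.1 0 + p.2)) d).getD t 0 + 1) := by
  induction L with
  | nil => intro d _ h; exact absurd h (by simp)
  | cons p L ih =>
    intro d hnd hmem
    by_cases hpt : p.1 = t
    · -- head is the bumped key; its value must be c, and t occurs in no tail key
      have hnotail : ∀ q ∈ L, q.1 ≠ t := by
        intro q hq hqt
        have : p.1 ∈ L.map Prod.fst := by
          rw [hpt, ← hqt]; exact List.mem_map_of_mem hq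
        simp only [List.map_cons, List.nodup_cons] at hnd
        exact hnd.1 this
      have hval : p = (t, c) := by
        rcases List.mem_cons.mp hmem with h | h
        · exact h.symm
        · exact absurd (rfl : t = t) (hnotail _ h)
      have hmap : L.map (fun p => if p.1 == t then (t, c + 1) else p) = L := by
        refine List.map_congr_left ?_ |>.trans (List.map_id L)
        intro q hq
        simp [hnotail q hq]
      subst hval
      rw [List.map_cons, hmap]
      simp only [List.foldl_cons, beq_self_eq_true, if_true]
      have hc1 : (d.insert t (d.getD t 0 + c)).contains t = true :=
        PySem.Dict.contains_insert_self _ _ _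
      rw [fold_getD_of_ne L t _ hnotail, PySem.Dict.getD_insert_self]
      have hins : d.insert t (d.getD t 0 + (c + 1))
          = (d.insert t (d.getD t 0 + c)).insert t (d.getD t 0 + c + 1) := by
        rw [PySem.Dict.insert_insert_self]; ring_nf
      rw [hins, fold_insert_comm L t _ _ hnotail hc1]
    · -- head untouched; recurse
      have hmem' : (t, c) ∈ L := by
        rcases List.mem_cons.mp hmem with h | h
        · exact absurd (by rw [← h]) hpt
        · exact h
      have hnd' : (L.map Prod.fst).Nodup := by
        simp only [List.map_cons, List.nodup_cons] at hnd; exact hnd.2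
      simp only [List.map_cons, List.foldl_cons]
      rw [if_neg (by simpa using hpt)]
      exact ih _ hnd' hmem'

-- merging Counter(l)'s items into d = folding the per-token increment of l over d
theorem merge_counter (l : List String) :
    ∀ (d : PySem.Dict String Int),
    (PySem.Dict.counter l).items.foldl (fun d p => d.insert p.1 (d.getD p.1 0 + p.2)) d
      = l.foldl (fun d t => d.insert t (d.getD t 0 + 1)) d := by
  induction l using List.reverseRecOn with
  | nil => intro d; rfl
  | append_singleton l t ih =>
    intro d
    have hctr : PySem.Dict.counter (l ++ [t])
        = (PySem.Dict.counter l).insert t ((PySem.Dict.counter l).getD t 0 + 1) := by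
      rw [← PySem.Dict.foldl_insert_getD_add_one_eq_counter,
          ← PySem.Dict.foldl_insert_getD_add_one_eq_counter, List.foldl_append]
      rfl
    rw [hctr, List.foldl_append]
    by_cases hc : (PySem.Dict.counter l).contains t = true
    · -- present: items map-bump, use bump_lemma
      obtain ⟨v, hv⟩ : ∃ v, (PySem.Dict.counter l).get? t = some v := by
        rcases h : (PySem.Dict.counter l).get? t with _ | v
        · rw [PySem.Dict.contains_eq_isSome_get?, h] at hc; simp at hc
        · exact ⟨v, rfl⟩
      have hgd : (PySem.Dict.counter l).getD t 0 = v :=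
        PySem.Dict.getD_of_get?_eq_some _ 0 hv
      have hmem : (t, v) ∈ (PySem.Dict.counter l).items :=
        PySem.Dict.mem_items_of_get?_eq_some _ hv
      have hndk : ((PySem.Dict.counter l).items.map Prod.fst).Nodup := by
        have := PySem.Dict.nodup_keys_counter (κ := String) l
        simpa [PySem.Dict.keys] using this
      rw [PySem.Dict.items_insert_of_contains _ _ hc, hgd]
      rw [bump_lemma _ t v _ hndk hmem, ih d]
      rfl
    · have hc' : (PySem.Dict.counter l).contains t = false := by simpa using hc
      rw [PySem.Dict.items_insert_of_not_contains _ _ hc', List.foldl_append, ih d,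
          PySem.Dict.getD_of_not_contains _ _ hc']
      simp only [List.foldl_cons, List.foldl_nil]
      norm_num

-- the divide-and-conquer count is Counter of the token list
theorem mergeCounts_eq_counter (l : List String) : pvMergeCounts l = PySem.Dict.counter l := by
  have H : ∀ (n : Nat) (l : List String), l.length ≤ n → pvMergeCounts l = PySem.Dict.counter l := by
    intro n
    induction n with
    | zero =>
      intro l hl
      have : l = [] := List.eq_nil_of_length_eq_zero (Nat.le_zero.mp hl)
      subst this
      rw [pvMergeCounts]
      rfl
    | succ n ih =>
      intro l hl
      by_cases hle : l.length ≤ 1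
      · rw [pvMergeCounts, if_pos hle]
        match l, hle with
        | [], _ => rfl
        | [t], _ =>
          rw [← PySem.Dict.foldl_insert_getD_add_one_eq_counter]
          simp [PySem.Dict.getD_empty]
      · rw [pvMergeCounts, if_neg hle]
        have hlen2 : 2 ≤ l.length := by omega
        have htake : (l.take (l.length / 2)).length ≤ n := by
          simp only [List.length_take]; omega
        have hdrop : (l.drop (l.length / 2)).length ≤ n := by
          simp only [List.length_drop]; omega
        simp only [ih _ htake, ih _ hdrop]
        rw [merge_counter]
        conv_rhs => rw [← List.take_append_drop (l.length / 2) l]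
        rw [← PySem.Dict.foldl_insert_getD_add_one_eq_counter,
            ← PySem.Dict.foldl_insert_getD_add_one_eq_counter, List.foldl_append]
  exact H l.length l le_rfl

-- ===== VERDICT =====
theorem computeAllIdf_spec : Claim_equal_computeAllIdf := by
  intro sl _
  unfold Spec_computeAllIdf computeAllIdf computeAllIdf_alt
  rw [flattenA, mergeCounts_eq_counter,
      ← PySem.Dict.foldl_insert_getD_add_one_eq_counter]
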